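-- pv_equiv track=rewrite | github.com/0kenx/mcp-servers | filesystem/src/grammar/regex_parser/generic_indentation_block.py | _fix_indentation_specific
-- ===== SOURCE A (Python) =====
-- from typing import List, Dict, Optional, Tuple, Any
--
-- def _fix_indentation_specific(code: str) -> Tuple[str, bool, Dict[str, Any]]:
--     """
--     Apply fixes specific to indentation-based languages.
--
--     Args:
--         code: Source code to fix
--
--     Returns:
--         Tuple of (fixed code, was_modified flag, diagnostics)
--     """
--     lines = code.splitlines()
--     modified = False
--     diagnostics = {"indentation_fixes": []}
--
--     # Check for incorrect dedents
--     stack = [0]  # Stack of indentation levels, starting with 0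
--     fixed_lines = []
--
--     for i, line in enumerate(lines):
--         if not line.strip():  # Skip empty lines
--             fixed_lines.append(line)
--             continue
--
--         current_indent = len(line) - len(line.lstrip())
--
--         # If indentation decreases, it should match one of the previous levels
--         if current_indent < stack[-1]:
--             # Find the closest matching indent level in the stack
--             while stack and current_indent < stack[-1]:
--                 stack.pop()
--
--             if not stack or current_indent != stack[-1]:
--                 # Indentation doesn't match any previous level - fix it
--                 if not stack:
--                     # If stack is empty, default to 0
--                     proper_indent = 0
--                 else:
--                     # Use the most recent matching level
--                     proper_indent = stack[-1]
--
--                 fixed_lines.append(' ' * proper_indent + line.lstrip())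
--                 modified = True
--                 diagnostics["indentation_fixes"].append(f"fixed_dedent_at_line_{i+1}")
--                 continue
--
--         # If indentation increases, add the new level to the stack
--         elif current_indent > stack[-1]:
--             stack.append(current_indent)
--
--         fixed_lines.append(line)
--
--     if modified:
--         code = '\n'.join(fixed_lines)
--
--     return code, modified, diagnostics
-- ===== SOURCE B (Python) =====
-- from typing import List, Dict, Optional, Tuple, Any
--
-- def _fix_indentation_specific(code: str) -> Tuple[str, bool, Dict[str, Any]]:
--     """Same fix, but dedents find their level with a binary search over the
--     (always sorted) indent stack instead of a linear pop loop."""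
--     lines = code.splitlines()
--     out: List[str] = []
--     fixes: List[str] = []
--     stack = [0]  # strictly increasing indentation levels
--     for i, line in enumerate(lines):
--         stripped = line.lstrip()
--         if not stripped:  # whitespace-only line
--             out.append(line)
--             continue
--         ci = len(line) - len(stripped)
--         top = stack[-1]
--         if ci > top:
--             stack.append(ci)
--             out.append(line)
--         elif ci == top:
--             out.append(line)
--         else:
--             # binary search: first index whose level exceeds ci (bisect_right)
--             lo, hi = 0, len(stack)
--             while lo < hi:
--                 mid = (lo + hi) // 2
--                 if stack[mid] <= ci:
--                     lo = mid + 1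
--                 else:
--                     hi = mid
--             del stack[lo:]
--             if stack[-1] == ci:
--                 out.append(line)
--             else:
--                 out.append(' ' * stack[-1] + stripped)
--                 fixes.append(f"fixed_dedent_at_line_{i+1}")
--     modified = bool(fixes)
--     return ('\n'.join(out) if modified else code), modified, {"indentation_fixes": fixes}
-- ===== Notes on version B (the rewrite author's own statement) =====
-- stated objective: alternative
-- what changed: Dedent matching: A pops the indent stack one level at a time in a while loop; B finds the target level with a hand-written binary search (bisect_right) over the always-sorted stack and truncates it in one step, and derives the modified flag from the fix list instead of threading a flag.
import Mathlib
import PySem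

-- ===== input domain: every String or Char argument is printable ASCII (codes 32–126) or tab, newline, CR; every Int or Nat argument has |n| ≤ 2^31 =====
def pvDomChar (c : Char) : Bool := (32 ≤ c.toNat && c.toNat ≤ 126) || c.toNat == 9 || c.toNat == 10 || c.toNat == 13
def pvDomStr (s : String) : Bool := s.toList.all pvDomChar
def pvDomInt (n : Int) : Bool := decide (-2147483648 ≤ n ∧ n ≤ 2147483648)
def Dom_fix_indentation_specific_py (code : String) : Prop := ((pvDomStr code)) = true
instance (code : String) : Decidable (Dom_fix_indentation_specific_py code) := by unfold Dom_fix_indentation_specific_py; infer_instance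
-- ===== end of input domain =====

-- B replaces A's linear pop-loop dedent matching with a binary search over the (always sorted)
-- indent stack and derives the `modified` flag from the fix list; same return value, alternative algorithm.

-- shared literal helpers (the identical Python expressions occur in A and in B)
-- ' ' * n + s  — exact: here n is a difference of lengths, hence ≥ 0 (toNat clamps exactly like Python for n ≤ 0)
def pvIndentStr (n : Int) (s : String) : String := String.ofList (List.replicate n.toNat ' ' ++ s.toList)
-- f"fixed_dedent_at_line_{n}"
def pvFixMsg (n : Int) : String := String.ofList ("fixed_dedent_at_line_".toList ++ PySem.Int.toChars n)

-- ===== PORT A =====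
-- the `while stack and current_indent < stack[-1]: stack.pop()` loop; stack kept TOP-FIRST in this port
def pvPopWhileA (ci : Int) : List Int → List Int
  | [] => []
  | t :: rest => if ci < t then pvPopWhileA ci rest else t :: rest

-- the `for i, line in enumerate(lines)` loop; stack top-first, so Python's stack[-1] is headD
-- (the stack is only read via Python's `stack[-1]` under a non-emptiness test, which headD renders exactly)
def pvLoopA : List String → Int → List Int → List String → Bool → List String →
    (List String × Bool × List String)
  | [], _, _, acc, modified, fixes => (acc, modified, fixes)
  | line :: rest, i, stack, acc, modified, fixes =>
    if PySem.Str.strip line = "" then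
      pvLoopA rest (i + 1) stack (acc ++ [line]) modified fixes
    else
      let ci := PySem.Str.len line - PySem.Str.len (PySem.Str.lstrip line)
      if ci < stack.headD 0 then
        let stack' := pvPopWhileA ci stack
        if stack'.isEmpty || !(decide (ci = stack'.headD 0)) then
          let proper : Int := if stack'.isEmpty then 0 else stack'.headD 0
          pvLoopA rest (i + 1) stack' (acc ++ [pvIndentStr proper (PySem.Str.lstrip line)]) true
            (fixes ++ [pvFixMsg (i + 1)])
        else
          pvLoopA rest (i + 1) stack' (acc ++ [line]) modified fixes
      else if stack.headD 0 < ci then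
        pvLoopA rest (i + 1) (ci :: stack) (acc ++ [line]) modified fixes
      else
        pvLoopA rest (i + 1) stack (acc ++ [line]) modified fixes

def fix_indentation_specific_py (code : String) : String × Bool × (List (String × List String)) :=
  let lines := PySem.Str.splitlines code
  let r := pvLoopA lines 0 [0] [] false []
  (if r.2.1 then PySem.Str.join "\n" r.1 else code, r.2.1, [("indentation_fixes", r.2.2)])

-- ===== PORT B =====
-- hand-written bisect_right (Source B's while lo < hi loop); stack kept in Python order (ascending)
-- stack[mid] via getD: B only calls this with hi = len(stack), so mid is always in range
def pvBsearchB (stack : List Int) (ci : Int) (lo hi : Nat) : Nat :=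
  if _h : lo < hi then
    let mid := (lo + hi) / 2
    if stack.getD mid 0 ≤ ci then pvBsearchB stack ci (mid + 1) hi
    else pvBsearchB stack ci lo mid
  else lo
termination_by hi - lo
decreasing_by all_goals omega

-- Source B's main loop; stack in Python (ascending) order, stack[-1] = getLastD (stack never empty: 0 is never cut)
def pvLoopB : List String → Int → List Int → List String → List String → (List String × List String)
  | [], _, _, acc, fixes => (acc, fixes)
  | line :: rest, i, stack, acc, fixes =>
    let stripped := PySem.Str.lstrip line
    if stripped = "" then
      pvLoopB rest (i + 1) stack (acc ++ [line]) fixes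
    else
      let ci := PySem.Str.len line - PySem.Str.len stripped
      let top := stack.getLastD 0
      if top < ci then
        pvLoopB rest (i + 1) (stack ++ [ci]) (acc ++ [line]) fixes
      else if ci = top then
        pvLoopB rest (i + 1) stack (acc ++ [line]) fixes
      else
        let lo := pvBsearchB stack ci 0 stack.length
        let stack' := stack.take lo
        if stack'.getLastD 0 = ci then
          pvLoopB rest (i + 1) stack' (acc ++ [line]) fixes
        else
          pvLoopB rest (i + 1) stack' (acc ++ [pvIndentStr (stack'.getLastD 0) stripped])
            (fixes ++ [pvFixMsg (i + 1)])

def fix_indentation_specific_py_alt (code : String) : String × Bool × (List (String × List String)) :=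
  let lines := PySem.Str.splitlines code
  let r := pvLoopB lines 0 [0] [] []
  let modified := !r.2.isEmpty
  (if modified then PySem.Str.join "\n" r.1 else code, modified, [("indentation_fixes", r.2)])

-- ===== PRECONDITION & SPEC =====
def Spec_fix_indentation_specific_py (code : String) (out : String × Bool × (List (String × List String))) : Prop := out = fix_indentation_specific_py_alt code
instance (code : String) (out : String × Bool × (List (String × List String))) : Decidable (Spec_fix_indentation_specific_py code out) := by unfold Spec_fix_indentation_specific_py; infer_instance

-- ===== CLAIM (what is proved, stated in full; the proofs are below) =====
def Claim_equal_fix_indentation_specific_py : Prop := ∀ (code : String), Dom_fix_indentation_specific_py code → Spec_fix_indentation_specific_py code (fix_indentation_specific_py code)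

-- ===== LEMMAS AND PROOFS =====

theorem pv_strip_empty_iff (line : String) :
    (PySem.Str.strip line = "") ↔ (PySem.Str.lstrip line = "") := by
  rw [← String.toList_eq_nil_iff, ← String.toList_eq_nil_iff,
      PySem.Str.toList_strip, PySem.Str.toList_lstrip]
  simp only [PySem.Chars.strip, PySem.Chars.rstrip, PySem.Chars.lstrip,
    List.reverse_eq_nil_iff, List.dropWhile_eq_nil_iff, List.mem_reverse]
  constructor
  · intro h x hx
    rcases List.mem_append.mp
      ((List.takeWhile_append_dropWhile (p := PySem.Chars.isspace) (l := line.toList)) ▸ hx) with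
      h1 | h1
    · exact List.mem_takeWhile_imp h1
    · exact h x h1
  · intro h x hx
    exact h x ((List.dropWhile_sublist _).mem hx)

theorem pv_ci_nonneg (line : String) :
    0 ≤ PySem.Str.len line - PySem.Str.len (PySem.Str.lstrip line) := by
  have h : (PySem.Str.lstrip line).toList.length ≤ line.toList.length := by
    rw [PySem.Str.toList_lstrip]; exact List.length_dropWhile_le _ _
  simp only [PySem.Str.len_eq]
  omega

theorem pv_headD_reverse (s : List Int) (hs : s ≠ []) : s.reverse.headD 0 = s.getLastD 0 := by
  induction s using List.reverseRecOn with
  | nil => simp at hs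
  | append_singleton l a ih => simp

theorem pv_mem_le_getLastD (s : List Int) (hp : s.Pairwise (· < ·)) (x : Int) (hx : x ∈ s) :
    x ≤ s.getLastD 0 := by
  induction s using List.reverseRecOn with
  | nil => simp at hx
  | append_singleton l a ih =>
    simp only [List.getLastD_concat]
    rcases List.mem_append.mp hx with h | h
    · have := (List.pairwise_append.mp hp).2.2 x h a (by simp)
      omega
    · simp at h; omega

theorem pv_popWhileA_eq (ci : Int) (s : List Int) (hp : s.Pairwise (· < ·)) :
    pvPopWhileA ci s.reverse = (s.takeWhile (fun x => decide (x ≤ ci))).reverse := by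
  induction s using List.reverseRecOn with
  | nil => simp [pvPopWhileA]
  | append_singleton l a ih =>
    rw [List.reverse_append, List.reverse_singleton, List.singleton_append]
    by_cases hca : ci < a
    · rw [show pvPopWhileA ci (a :: l.reverse) = pvPopWhileA ci l.reverse from by
        simp [pvPopWhileA, hca]]
      rw [ih (List.Pairwise.sublist (List.sublist_append_left l [a]) hp)]
      rw [List.takeWhile_append]
      split
      · next hlen =>
        have heq : List.takeWhile (fun x => decide (x ≤ ci)) l = l :=
          (List.takeWhile_prefix _).eq_of_length hlen
        rw [heq]
        have hd : (decide (a ≤ ci)) = false := by simp; omega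
        simp [hd]
      · rfl
    · have hale : a ≤ ci := by omega
      have hall : ∀ x ∈ l, (fun x => decide (x ≤ ci)) x = true := by
        intro x hx
        have := (List.pairwise_append.mp hp).2.2 x hx a (by simp)
        simp; omega
      have htw : List.takeWhile (fun x => decide (x ≤ ci)) l = l :=
        List.takeWhile_eq_self_iff.mpr hall
      rw [List.takeWhile_append, htw]
      simp [pvPopWhileA, hca, hale, List.takeWhile]

theorem pv_getElem_takeWhile_len_not (p : Int → Bool) (s : List Int)
    (h : (s.takeWhile p).length < s.length) :
    ¬ p (s[(s.takeWhile p).length]) = true := by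
  intro hp
  have hd : s.dropWhile p ≠ [] := by
    intro hnil
    have h2 := List.takeWhile_append_dropWhile (p := p) (l := s)
    rw [hnil, List.append_nil] at h2
    rw [h2] at h; omega
  have hhead := List.head_dropWhile_not p hd
  set k := (s.takeWhile p).length with hk
  have hq : s[k]? = some ((s.dropWhile p).head hd) := by
    conv_lhs => rw [← List.takeWhile_append_dropWhile (p := p) (l := s)]
    rw [List.getElem?_append_right (by omega), hk, Nat.sub_self,
      List.getElem?_eq_getElem (by simpa using List.length_pos_iff.mpr hd)]
    simp [List.getElem_zero_eq_head]
  rw [List.getElem?_eq_getElem h] at hq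
  have := Option.some.inj hq
  rw [this, hhead] at hp
  exact Bool.false_ne_true hp

theorem pv_bsearchB_inv (s : List Int) (ci : Int) (k : Nat)
    (h1 : ∀ j (hj : j < s.length), j < k → s[j] ≤ ci)
    (h2 : ∀ j (hj : j < s.length), k ≤ j → ci < s[j]) :
    ∀ lo hi, lo ≤ k → k ≤ hi → hi ≤ s.length → pvBsearchB s ci lo hi = k := by
  intro lo hi
  induction lo, hi using pvBsearchB.induct s ci with
  | case1 lo hi h mid hle ih =>
    intro hlo hhi hlen
    rw [pvBsearchB]
    simp only [dif_pos h, show (lo + hi) / 2 = mid from rfl, if_pos hle]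
    have hmid : mid < s.length := by omega
    have hle' : s[mid] ≤ ci := by rwa [List.getD_eq_getElem _ _ hmid] at hle
    have : mid < k := by
      by_contra hc
      exact absurd hle' (not_le.mpr (h2 mid hmid (by omega)))
    exact ih (by omega) hhi hlen
  | case2 lo hi h mid hle ih =>
    intro hlo hhi hlen
    rw [pvBsearchB]
    simp only [dif_pos h, show (lo + hi) / 2 = mid from rfl, if_neg hle]
    have hmid : mid < s.length := by omega
    have hle' : ¬ s[mid] ≤ ci := by rwa [List.getD_eq_getElem _ _ hmid] at hle
    have : k ≤ mid := by
      by_contra hc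
      exact hle' (h1 mid hmid (by omega))
    exact ih hlo (by omega) (by omega)
  | case3 lo hi h =>
    intro hlo hhi hlen
    rw [pvBsearchB]
    simp only [dif_neg h]
    omega

theorem pv_bsearchB_eq (s : List Int) (ci : Int) (hp : s.Pairwise (· < ·)) :
    pvBsearchB s ci 0 s.length = (s.takeWhile (fun x => decide (x ≤ ci))).length := by
  set p : Int → Bool := fun x => decide (x ≤ ci) with hpdef
  set k := (s.takeWhile p).length with hk
  have hkle : k ≤ s.length := by
    simpa [hk] using (List.takeWhile_sublist (l := s) p).length_le
  have hget := List.pairwise_iff_getElem.mp hp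
  have h1 : ∀ j (hj : j < s.length), j < k → s[j] ≤ ci := by
    intro j hj hjk
    have hjk' : j < (s.takeWhile p).length := by omega
    have := List.mem_takeWhile_imp (List.getElem_mem hjk')
    rw [(List.takeWhile_prefix p).getElem hjk'] at this
    simpa [hpdef] using this
  have h2 : ∀ j (hj : j < s.length), k ≤ j → ci < s[j] := by
    intro j hj hkj
    have hk2 : k < s.length := by omega
    have hfail := pv_getElem_takeWhile_len_not p s (by omega)
    simp only [← hk] at hfail
    have hks : ci < s[k] := by
      by_contra hc
      exact hfail (by simp only [hpdef]; simp; omega)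
    rcases Nat.eq_or_lt_of_le hkj with rfl | hlt
    · exact hks
    · exact lt_trans hks (hget k j hk2 hj hlt)
  exact pv_bsearchB_inv s ci k h1 h2 0 s.length (by omega) hkle le_rfl

theorem pv_loop_eq (lines : List String) : ∀ (i : Int) (s : List Int) (acc fixes : List String),
    s.head? = some 0 → s.Pairwise (· < ·) →
    pvLoopA lines i s.reverse acc (!fixes.isEmpty) fixes =
      ((pvLoopB lines i s acc fixes).1, !(pvLoopB lines i s acc fixes).2.isEmpty,
        (pvLoopB lines i s acc fixes).2) := by
  induction lines with
  | nil => intro i s acc fixes h0 hp; simp [pvLoopA, pvLoopB]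
  | cons line rest ih =>
    intro i s acc fixes h0 hp
    have hsne : s ≠ [] := by intro h; rw [h] at h0; simp at h0
    have hrev : s.reverse.headD 0 = s.getLastD 0 := pv_headD_reverse s hsne
    by_cases hemp : PySem.Str.lstrip line = ""
    · have hstrip : PySem.Str.strip line = "" := (pv_strip_empty_iff line).mpr hemp
      simp only [pvLoopA, pvLoopB, if_pos hstrip, if_pos hemp]
      exact ih (i + 1) s (acc ++ [line]) fixes h0 hp
    · have hstrip : ¬ PySem.Str.strip line = "" := fun h => hemp ((pv_strip_empty_iff line).mp h)
      set ci := PySem.Str.len line - PySem.Str.len (PySem.Str.lstrip line) with hci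
      have hci0 : 0 ≤ ci := pv_ci_nonneg line
      set top := s.getLastD 0 with htop
      rcases lt_trichotomy ci top with hlt | heq | hgt
      · -- dedent: the interesting case
        have hw : pvPopWhileA ci s.reverse = (s.takeWhile (fun x => decide (x ≤ ci))).reverse :=
          pv_popWhileA_eq ci s hp
        set w := s.takeWhile (fun x => decide (x ≤ ci)) with hwdef
        obtain ⟨t, hst⟩ : ∃ t, s = 0 :: t := by
          cases s with
          | nil => exact absurd rfl hsne
          | cons a t =>
            have ha : a = 0 := by simpa using h0
            exact ⟨t, by rw [ha]⟩
        have hw0 : w.head? = some 0 := by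
          rw [hwdef, hst, List.takeWhile_cons, if_pos (by simp; omega)]
          rfl
        have hwne : w ≠ [] := by intro h; rw [h] at hw0; simp at hw0
        have hwp : w.Pairwise (· < ·) := List.Pairwise.sublist (List.takeWhile_sublist _) hp
        have hwrev : w.reverse.headD 0 = w.getLastD 0 := pv_headD_reverse w hwne
        have hbs : pvBsearchB s ci 0 s.length = w.length := pv_bsearchB_eq s ci hp
        have htake : s.take w.length = w :=
          (List.prefix_iff_eq_take.mp (List.takeWhile_prefix _)).symm
        have hrevne : w.reverse.isEmpty = false := by
          simp [hwne]
        -- reduce both sides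
        simp only [pvLoopA, pvLoopB, if_neg hstrip, if_neg hemp, ← hci]
        rw [hrev, ← htop]
        rw [if_pos (show ci < top from hlt),
            if_neg (show ¬ top < ci by omega),
            if_neg (show ¬ ci = top by omega)]
        rw [hw, hbs, htake, hrevne]
        simp only [Bool.false_or, Bool.false_eq_true, if_false, hwrev]
        by_cases hmatch : w.getLastD 0 = ci
        · rw [if_pos hmatch,
              if_neg (show ¬ ((!decide (ci = w.getLastD 0)) = true) by rw [hmatch]; simp)]
          exact ih (i + 1) w (acc ++ [line]) fixes hw0 hwp
        · rw [if_neg hmatch,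
              if_pos (show (!decide (ci = w.getLastD 0)) = true by
                simp only [Bool.not_eq_true', decide_eq_false_iff_not]
                exact fun h => hmatch h.symm)]
          have := ih (i + 1) w (acc ++ [pvIndentStr (w.getLastD 0) (PySem.Str.lstrip line)])
            (fixes ++ [pvFixMsg (i + 1)]) hw0 hwp
          rwa [show (!(fixes ++ [pvFixMsg (i + 1)]).isEmpty) = true by simp] at this
      · -- same level
        simp only [pvLoopA, pvLoopB, if_neg hstrip, if_neg hemp, ← hci]
        rw [hrev, ← htop]
        rw [if_neg (show ¬ ci < top by omega),
            if_neg (show ¬ top < ci by omega),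
            if_neg (show ¬ top < ci by omega),
            if_pos (show ci = top from heq)]
        exact ih (i + 1) s (acc ++ [line]) fixes h0 hp
      · -- indent: push
        simp only [pvLoopA, pvLoopB, if_neg hstrip, if_neg hemp, ← hci]
        rw [hrev, ← htop]
        rw [if_neg (show ¬ ci < top by omega),
            if_pos (show top < ci from hgt),
            if_pos (show top < ci from hgt)]
        have hpush0 : (s ++ [ci]).head? = some 0 := by
          rw [List.head?_append, h0]; rfl
        have hpushp : (s ++ [ci]).Pairwise (· < ·) := by
          rw [List.pairwise_append]
          exact ⟨hp, by simp, fun x hx y hy => by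
            simp at hy; subst hy
            have := pv_mem_le_getLastD s hp x hx
            omega⟩
        have := ih (i + 1) (s ++ [ci]) (acc ++ [line]) fixes hpush0 hpushp
        simpa [List.reverse_append] using this

-- ===== VERDICT (by name: the statement is the Claim_ definition above) =====
theorem fix_indentation_specific_py_spec : Claim_equal_fix_indentation_specific_py := by
  intro code _
  unfold Spec_fix_indentation_specific_py fix_indentation_specific_py fix_indentation_specific_py_alt
  have h := pv_loop_eq (PySem.Str.splitlines code) 0 [0] [] [] rfl (by simp)
  simp only [List.reverse_singleton, List.isEmpty_nil, Bool.not_true] at h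
  dsimp only
  rw [h]
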